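-- pv_equiv track=rewrite | github.com/pypi-data/pypi-mirror-403 | packages/openadapt-ml/openadapt_ml-0.2.1-py3-none-any.whl/openadapt_ml/experiments/demo_prompt/format_demo.py | generate_length_matched_control
-- ===== SOURCE A (Python) =====
-- def generate_length_matched_control(demo: str) -> str:
--     """Generate a control prompt with the same token count but no trajectory info.
--
--     Used to control for prompt length effects.
--
--     Args:
--         demo: The demo string to match length of.
--
--     Returns:
--         Control string of similar length with irrelevant content.
--     """
--     # Use generic placeholder text
--     placeholder = (
--         "This is placeholder text that serves as a control condition. "
--         "It contains no relevant information about the task or demonstration. "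
--         "The purpose is to match the token count of the demonstration prompt. "
--     )
--
--     # Repeat to match approximate length
--     target_len = len(demo)
--     control = ""
--     while len(control) < target_len:
--         control += placeholder
--
--     return control[:target_len]
-- ===== SOURCE B (Python) =====
-- def generate_length_matched_control(demo: str) -> str:
--     """Generate a control prompt with the same character count but no trajectory info."""
--     placeholder = (
--         "This is placeholder text that serves as a control condition. "
--         "It contains no relevant information about the task or demonstration. "
--         "The purpose is to match the token count of the demonstration prompt. "
--     )
--     target_len = len(demo)
--     n = -(-target_len // len(placeholder))  # ceiling division
--     return (placeholder * n)[:target_len]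
-- ===== Notes on version B (the rewrite author's own statement) =====
-- stated objective: faster
-- what changed: Replaces the while-append accumulation loop with a closed-form ceiling-division repeat count followed by one string multiply and slice (no quadratic string re-concatenation).
import Mathlib
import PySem

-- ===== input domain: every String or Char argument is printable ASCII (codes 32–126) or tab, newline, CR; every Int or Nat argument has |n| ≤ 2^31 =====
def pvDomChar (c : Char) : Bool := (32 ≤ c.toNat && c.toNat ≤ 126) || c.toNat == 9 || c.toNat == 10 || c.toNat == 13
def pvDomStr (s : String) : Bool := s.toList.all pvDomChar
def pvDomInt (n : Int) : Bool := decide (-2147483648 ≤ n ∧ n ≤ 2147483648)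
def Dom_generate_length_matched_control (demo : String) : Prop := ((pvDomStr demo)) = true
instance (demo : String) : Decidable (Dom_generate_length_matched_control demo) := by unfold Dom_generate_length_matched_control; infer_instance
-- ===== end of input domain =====

-- B replaces A's while-append loop by a closed-form ceiling-division repeat count,
-- one repetition and one slice (measured faster: no repeated string concatenation).

-- ===== PORT A =====
-- the placeholder literal, as a character list (both ports use the same literal)
def pvPlaceholder : List Char :=
  ("This is placeholder text that serves as a control condition. It contains no relevant information about the task or demonstration. The purpose is to match the token count of the demonstration prompt. ").toList

set_option maxRecDepth 2048 in
theorem pvPlaceholder_length : pvPlaceholder.length = 199 := by decide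

-- while len(control) < target_len: control += placeholder
def pvLoopA (target : Nat) (control : List Char) : List Char :=
  if control.length < target then pvLoopA target (control ++ pvPlaceholder) else control
termination_by target - control.length
decreasing_by
  simp only [List.length_append, pvPlaceholder_length]
  omega

def generate_length_matched_control (demo : String) : String :=
  let target := demo.toList.length          -- target_len = len(demo)
  String.mk ((pvLoopA target []).take target)   -- control[:target_len]; exact: target ≥ 0

-- ===== PORT B =====
def generate_length_matched_control_alt (demo : String) : String :=
  let target : Int := (demo.toList.length : Int)                              -- target_len = len(demo)
  let n : Int := -(PySem.Int.floordiv (-target) (pvPlaceholder.length : Int)) -- -(-target_len // len(placeholder))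
  -- (placeholder * n)[:target_len]; exact: n and target are ≥ 0
  String.mk (((List.replicate n.toNat pvPlaceholder).flatten).take target.toNat)

-- ===== PRECONDITION & SPEC =====
def Spec_generate_length_matched_control (demo : String) (out : String) : Prop := out = generate_length_matched_control_alt demo
instance (demo : String) (out : String) : Decidable (Spec_generate_length_matched_control demo out) := by unfold Spec_generate_length_matched_control; infer_instance

-- ===== CLAIM (what is proved, stated in full; the proofs are below) =====
def Claim_equal_generate_length_matched_control : Prop := ∀ (demo : String), Dom_generate_length_matched_control demo → Spec_generate_length_matched_control demo (generate_length_matched_control demo)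

-- ===== LEMMAS AND PROOFS =====

-- A's loop, sliced to target, equals any sufficiently long repetition of the placeholder, sliced.
theorem pvLoopA_take (n : Nat) : ∀ (target : Nat) (c : List Char),
    target ≤ c.length + n * 199 →
    (pvLoopA target c).take target = (c ++ (List.replicate n pvPlaceholder).flatten).take target := by
  induction n with
  | zero =>
    intro target c h
    rw [pvLoopA]
    simp at h
    have : ¬ c.length < target := by omega
    simp [this]
  | succ k ih =>
    intro target c h
    rw [pvLoopA]
    by_cases hc : c.length < target
    · simp only [hc, if_true]
      have := ih target (c ++ pvPlaceholder)
        (by simp [pvPlaceholder_length]; omega)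
      rw [this]
      simp [List.replicate_succ, List.append_assoc]
    · simp only [hc, if_false]
      rw [List.take_append]
      have : target - c.length = 0 := by omega
      simp [this]

-- ===== VERDICT (by name: the statement is the Claim_ definition above) =====
theorem generate_length_matched_control_spec : Claim_equal_generate_length_matched_control := by
  intro demo _
  unfold Spec_generate_length_matched_control generate_length_matched_control generate_length_matched_control_alt
  set target := demo.toList.length with htarget
  set q : Nat := (target + 198) / 199 with hq
  have hdm := Nat.div_add_mod (target + 198) 199
  have hmod : (target + 198) % 199 < 199 := Nat.mod_lt _ (by omega)
  have hceil : -(PySem.Int.floordiv (-(target : Int)) ((pvPlaceholder.length : Nat) : Int)) = (q : Int) := by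
    rw [pvPlaceholder_length]
    rw [PySem.Int.neg_floordiv_neg_eq_iff_of_pos (by omega)]
    constructor
    · push_cast; omega
    · push_cast; omega
  simp only [hceil]
  have hn : ((q : Int)).toNat = q := Int.toNat_natCast q
  have hlen : target ≤ ([] : List Char).length + q * 199 := by simp; omega
  rw [hn, Int.toNat_natCast]
  rw [pvLoopA_take q target [] hlen]
  simp
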